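-- pv_equiv track=rewrite | github.com/CrackDaymar/Free-article | main.py | make_all_visible_articles
-- ===== SOURCE A (Python) =====
-- def make_all_visible_articles(count_of_articles):
--     all_usible_article = []  # список всех коунтеров
--     if count_of_articles == 1:
--         for i in range(1, 9):
--             all_usible_article.append(str(i))
--     if count_of_articles == 2:
--         for i in range(10, 99):
--             all_usible_article.append(str(i))
--     if count_of_articles == 3:
--         for i in range(100, 999):
--             all_usible_article.append(str(i))
--     if count_of_articles == 4:
--         for i in range(1000, 9999):
--             all_usible_article.append(str(i))
--     if count_of_articles == 5:
--         for i in range(10000, 99999):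
--             all_usible_article.append(str(i))
--     if count_of_articles == 6:
--         for i in range(100000, 999999):
--             all_usible_article.append(str(i))
--     if count_of_articles == 7:
--         for i in range(1000000, 9999999):
--             all_usible_article.append(str(i))
--     if count_of_articles == 8:
--         for i in range(10000000, 99999999):
--             all_usible_article.append(str(i))
--     return all_usible_article
-- ===== SOURCE B (Python) =====
-- def make_all_visible_articles(count_of_articles):
--     # Build the n-digit numbers by recursive digit extension instead of scanning a range:
--     # start from the one-digit numbers 1..9 and repeatedly append each digit 0..9.
--     if count_of_articles not in (1, 2, 3, 4, 5, 6, 7, 8):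
--         return []
--     nums = list(range(1, 10))
--     for _ in range(count_of_articles - 1):
--         nums = [10 * x + d for x in nums for d in range(10)]
--     nums.pop()  # the original's ranges stop one short of the all-nines maximum
--     return [str(x) for x in nums]
-- ===== Notes on version B (the rewrite author's own statement) =====
-- stated objective: alternative
-- what changed: Replaces the eight unrolled literal range scans by a recursive digit-extension build: start from the one-digit numbers 1..9 and repeatedly append every digit 0..9, then drop the final all-nines number, which the original's ranges also exclude.
import Mathlib
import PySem

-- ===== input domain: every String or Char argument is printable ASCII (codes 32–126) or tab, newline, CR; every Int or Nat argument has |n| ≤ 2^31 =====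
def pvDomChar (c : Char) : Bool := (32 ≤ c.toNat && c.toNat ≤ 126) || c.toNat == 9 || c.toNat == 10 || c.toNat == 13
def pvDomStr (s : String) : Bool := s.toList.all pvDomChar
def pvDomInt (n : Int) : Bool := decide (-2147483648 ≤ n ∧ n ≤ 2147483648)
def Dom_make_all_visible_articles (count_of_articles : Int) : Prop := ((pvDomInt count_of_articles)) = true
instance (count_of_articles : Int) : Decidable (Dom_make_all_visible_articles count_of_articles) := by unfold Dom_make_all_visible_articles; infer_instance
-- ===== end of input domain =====

-- B builds the n-digit numbers by recursive digit extension (append each digit 0..9 starting from 1..9)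
-- instead of A's eight unrolled literal range scans; an alternative of the same cost.


-- ===== PORT A =====
-- Literal transliteration of A: eight chained equality tests, each appending str(i) for i in its literal range.
def make_all_visible_articles (count_of_articles : Int) : List String :=
  let a0 : List String := []
  let a1 := if count_of_articles = 1 then a0 ++ (PySem.List.pyRange 1 9 1).map PySem.Int.toStr else a0
  let a2 := if count_of_articles = 2 then a1 ++ (PySem.List.pyRange 10 99 1).map PySem.Int.toStr else a1
  let a3 := if count_of_articles = 3 then a2 ++ (PySem.List.pyRange 100 999 1).map PySem.Int.toStr else a2
  let a4 := if count_of_articles = 4 then a3 ++ (PySem.List.pyRange 1000 9999 1).map PySem.Int.toStr else a3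
  let a5 := if count_of_articles = 5 then a4 ++ (PySem.List.pyRange 10000 99999 1).map PySem.Int.toStr else a4
  let a6 := if count_of_articles = 6 then a5 ++ (PySem.List.pyRange 100000 999999 1).map PySem.Int.toStr else a5
  let a7 := if count_of_articles = 7 then a6 ++ (PySem.List.pyRange 1000000 9999999 1).map PySem.Int.toStr else a6
  let a8 := if count_of_articles = 8 then a7 ++ (PySem.List.pyRange 10000000 99999999 1).map PySem.Int.toStr else a7
  a8

-- ===== PORT B =====
-- Port of B: tuple-membership guard, then the digit-extension fold over range(count-1),
-- nums.pop() removes the last (all-nines) element = dropLast, finally map str.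
def make_all_visible_articles_alt (count_of_articles : Int) : List String :=
  if count_of_articles = 1 ∨ count_of_articles = 2 ∨ count_of_articles = 3 ∨ count_of_articles = 4 ∨
     count_of_articles = 5 ∨ count_of_articles = 6 ∨ count_of_articles = 7 ∨ count_of_articles = 8 then
    let nums0 := PySem.List.pyRange 1 10 1
    let nums := (List.range (count_of_articles - 1).toNat).foldl
      (fun ns _ => ns.flatMap (fun x => (PySem.List.pyRange 0 10 1).map (fun d => 10 * x + d))) nums0
    (nums.dropLast).map PySem.Int.toStr
  else []

-- ===== PRECONDITION & SPEC =====
def Spec_make_all_visible_articles (count_of_articles : Int) (out : List String) : Prop := out = make_all_visible_articles_alt count_of_articles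
instance (count_of_articles : Int) (out : List String) : Decidable (Spec_make_all_visible_articles count_of_articles out) := by unfold Spec_make_all_visible_articles; infer_instance

-- ===== CLAIM (what is proved, stated in full; the proofs are below) =====
def Claim_equal_make_all_visible_articles : Prop := ∀ (count_of_articles : Int), Dom_make_all_visible_articles count_of_articles → Spec_make_all_visible_articles count_of_articles (make_all_visible_articles count_of_articles)

-- ===== LEMMAS AND PROOFS =====

-- Appending one digit 0..9 to every number of [a, b) yields exactly [10a, 10b).
theorem flatMap_digits (a b : Int) (h : a ≤ b) :
    (PySem.List.pyRange a b 1).flatMap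
        (fun x => (PySem.List.pyRange 0 10 1).map (fun d => 10 * x + d))
      = PySem.List.pyRange (10 * a) (10 * b) 1 := by
  obtain ⟨n, hn⟩ : ∃ n : Nat, b = a + n := ⟨(b - a).toNat, by omega⟩
  subst hn
  clear h
  induction n generalizing a with
  | zero =>
      simp [PySem.List.pyRange_one_eq_nil (le_refl a),
        PySem.List.pyRange_one_eq_nil (le_refl (10 * a))]
  | succ k ih =>
      rw [PySem.List.pyRange_one_cons (a := a) (b := a + (k + 1 : Nat)) (by push_cast; omega)]
      rw [List.flatMap_cons]
      have hstep : ((PySem.List.pyRange 0 10 1).map (fun d => 10 * a + d))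
          = PySem.List.pyRange (10 * a) (10 * a + 10) 1 := by
        rw [PySem.List.pyRange_one 0 10, PySem.List.pyRange_one (10 * a) (10 * a + 10)]
        simp [List.map_map, Function.comp]
      have htail : (a : Int) + 1 + (k : Int) = a + (k + 1 : Nat) := by push_cast; ring
      have := ih (a + 1)
      rw [show (a : Int) + 1 + (k : Nat) = a + (k + 1 : Nat) by push_cast; ring] at this
      rw [this, hstep, show (10 : Int) * (a + 1) = 10 * a + 10 by ring]
      exact (PySem.List.pyRange_one_append (10 * a) (10 * a + 10) (10 * (a + (k + 1 : Nat)))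
        (by omega) (by push_cast; omega)).symm

-- After k digit-extension passes the list is exactly the (k+1)-digit numbers [10^k, 10^(k+1)).
theorem fold_digits (k : Nat) :
    (List.range k).foldl
        (fun ns _ => ns.flatMap (fun x => (PySem.List.pyRange 0 10 1).map (fun d => 10 * x + d)))
        (PySem.List.pyRange 1 10 1)
      = PySem.List.pyRange ((10 : Int) ^ k) ((10 : Int) ^ (k + 1)) 1 := by
  induction k with
  | zero => norm_num
  | succ m ih =>
      rw [List.range_succ, List.foldl_append, ih, List.foldl_cons, List.foldl_nil]
      rw [flatMap_digits _ _ (by exact pow_le_pow_right₀ (by norm_num) (Nat.le_succ m))]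
      congr 1 <;> ring

theorem dropLast_pyRange (a b : Int) (h : a < b) :
    (PySem.List.pyRange a b 1).dropLast = PySem.List.pyRange a (b - 1) 1 := by
  have hb := PySem.List.pyRange_one_succ_right (a := a) (b := b - 1) (by omega)
  rw [show b - 1 + 1 = b by ring] at hb
  rw [hb, List.dropLast_concat]

-- ===== VERDICT (by name: the statement is the Claim_ definition above) =====
set_option maxRecDepth 8000 in
theorem make_all_visible_articles_spec : Claim_equal_make_all_visible_articles := by
  intro c _
  unfold Spec_make_all_visible_articles make_all_visible_articles make_all_visible_articles_alt
  by_cases h : c = 1 ∨ c = 2 ∨ c = 3 ∨ c = 4 ∨ c = 5 ∨ c = 6 ∨ c = 7 ∨ c = 8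
  · rw [if_pos h]
    rcases h with h | h | h | h | h | h | h | h <;> subst h <;>
      · simp only [Int.reduceEq, reduceIte]
        rw [List.nil_append]
        simp only [Int.reduceSub, Int.reduceToNat]
        rw [fold_digits, dropLast_pyRange _ _ (by norm_num)]
        norm_num
  · rw [if_neg h]
    obtain ⟨n1, n2, n3, n4, n5, n6, n7, n8⟩ :
        c ≠ 1 ∧ c ≠ 2 ∧ c ≠ 3 ∧ c ≠ 4 ∧ c ≠ 5 ∧ c ≠ 6 ∧ c ≠ 7 ∧ c ≠ 8 := by
      push Not at h; exact h
    simp only [if_neg n1, if_neg n2, if_neg n3, if_neg n4, if_neg n5, if_neg n6, if_neg n7,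
      if_neg n8]
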